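-- pv_equiv track=rewrite | github.com/PrathamBhavsar/fik-scraper | video_downloader_organizer.py | parse_stream_info
-- ===== SOURCE A (Python) =====
-- from typing import Dict, List, Optional, Any, Tuple
--
-- def parse_stream_info(stream_line: str) -> Dict[str, str]:
--     """Parse EXT-X-STREAM-INF line to extract stream information"""
--     info = {}
--
--     # Remove the EXT-X-STREAM-INF prefix
--     stream_line = stream_line.replace("#EXT-X-STREAM-INF:", "")
--
--     # Parse comma-separated key=value pairs
--     pairs = []
--     current_pair = ""
--     in_quotes = False
--
--     for char in stream_line:
--         if char == '"':
--             in_quotes = not in_quotes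
--             current_pair += char
--         elif char == ',' and not in_quotes:
--             pairs.append(current_pair.strip())
--             current_pair = ""
--         else:
--             current_pair += char
--
--     if current_pair.strip():
--         pairs.append(current_pair.strip())
--
--     # Parse each pair
--     for pair in pairs:
--         if "=" in pair:
--             key, value = pair.split("=", 1)
--             info[key.strip()] = value.strip().strip('"')
--
--     return info
-- ===== SOURCE B (Python) =====
-- def parse_stream_info(stream_line: str):
--     """Parse EXT-X-STREAM-INF line to extract stream information.
--
--     Splits on commas first, then re-joins segments whose quote count is odd,
--     instead of scanning character by character with an in_quotes flag."""
--     info = {}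
--     s = stream_line.replace("#EXT-X-STREAM-INF:", "")
--     pairs = []
--     buf = None
--     for seg in s.split(','):
--         buf = seg if buf is None else buf + ',' + seg
--         if buf.count('"') % 2 == 0:
--             pairs.append(buf.strip())
--             buf = None
--     if buf is not None and buf.strip():
--         pairs.append(buf.strip())
--     for pair in pairs:
--         if "=" in pair:
--             key, value = pair.split("=", 1)
--             info[key.strip()] = value.strip().strip('"')
--     return info
-- ===== Notes on version B (the rewrite author's own statement) =====
-- stated objective: faster
-- what changed: Replaces the character-by-character scan with an in_quotes flag by one str.split on commas followed by re-joining adjacent segments whose accumulated quote count is odd; the per-pair key=value handling is unchanged.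
import Mathlib
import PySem

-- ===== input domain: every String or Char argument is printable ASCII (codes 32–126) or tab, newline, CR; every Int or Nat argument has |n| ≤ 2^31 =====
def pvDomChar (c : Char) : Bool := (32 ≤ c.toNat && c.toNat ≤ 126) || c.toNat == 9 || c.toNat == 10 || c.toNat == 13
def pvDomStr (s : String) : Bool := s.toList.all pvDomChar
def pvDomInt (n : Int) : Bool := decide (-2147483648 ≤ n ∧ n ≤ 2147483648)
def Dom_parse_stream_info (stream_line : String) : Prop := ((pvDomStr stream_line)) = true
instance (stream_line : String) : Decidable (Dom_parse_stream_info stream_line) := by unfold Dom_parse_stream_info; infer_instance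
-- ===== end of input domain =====

-- B parses the same line by one split on commas plus re-joining segments whose accumulated
-- quote count is odd, instead of A's character-by-character scan with an in_quotes flag
-- (measurably faster in Python: the scan moves into str.split/str.count).

-- shared helper: the per-pair 'key=value' handling, verbatim-identical lines in both Pythons
def pvPairStep (d : PySem.Dict String String) (p : List Char) : PySem.Dict String String :=
  if PySem.Chars.isIn ['='] p then
    match PySem.Chars.splitOnMax p ['='] 1 with
    | k :: v :: _ =>
        d.insert (String.ofList (PySem.Chars.strip k))
                 (String.ofList (PySem.Chars.stripChars (PySem.Chars.strip v) ['"']))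
    | _ => d
  else d

-- ===== PORT A =====
def pvStepA (st : List (List Char) × List Char × Bool) (c : Char) :
    List (List Char) × List Char × Bool :=
  if c == '"' then (st.1, st.2.1 ++ [c], !st.2.2)
  else if c == ',' && !st.2.2 then (st.1 ++ [PySem.Chars.strip st.2.1], [], st.2.2)
  else (st.1, st.2.1 ++ [c], st.2.2)

def parse_stream_info (stream_line : String) : List (String × String) :=
  let s := PySem.Str.replace stream_line "#EXT-X-STREAM-INF:" ""
  let st := s.toList.foldl pvStepA ([], [], false)
  let pairs := if PySem.Chars.strip st.2.1 = [] then st.1 else st.1 ++ [PySem.Chars.strip st.2.1]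
  (pairs.foldl pvPairStep PySem.Dict.empty).items

-- ===== PORT B =====
def pvStepB (st : List (List Char) × Option (List Char)) (seg : List Char) :
    List (List Char) × Option (List Char) :=
  let buf := match st.2 with | none => seg | some b => b ++ [','] ++ seg
  if PySem.Chars.count buf ['"'] % 2 == 0 then (st.1 ++ [PySem.Chars.strip buf], none)
  else (st.1, some buf)

def parse_stream_info_alt (stream_line : String) : List (String × String) :=
  let s := PySem.Str.replace stream_line "#EXT-X-STREAM-INF:" ""
  let st := (PySem.Chars.splitOn s.toList [',']).foldl pvStepB ([], none)
  let pairs := match st.2 with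
    | none => st.1
    | some b => if PySem.Chars.strip b = [] then st.1 else st.1 ++ [PySem.Chars.strip b]
  (pairs.foldl pvPairStep PySem.Dict.empty).items

-- ===== PRECONDITION & SPEC =====
def Spec_parse_stream_info (stream_line : String) (out : List (String × String)) : Prop := out = parse_stream_info_alt stream_line
instance (stream_line : String) (out : List (String × String)) : Decidable (Spec_parse_stream_info stream_line out) := by unfold Spec_parse_stream_info; infer_instance

-- ===== CLAIM (what is proved, stated in full; the proofs are below) =====
def Claim_equal_parse_stream_info : Prop := ∀ (stream_line : String), Dom_parse_stream_info stream_line → Spec_parse_stream_info stream_line (parse_stream_info stream_line)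

-- ===== LEMMAS AND PROOFS =====

def pvSplit (c : Char) : List Char → List (List Char)
  | [] => [[]]
  | d :: t => if d = c then [] :: pvSplit c t else (pvSplit c t).modifyHead (d :: ·)

def pvJoin (c : Char) : List (List Char) → List Char
  | [] => []
  | [s] => s
  | s :: r => s ++ c :: pvJoin c r

lemma pvJoin_cons (c : Char) (s : List Char) (r : List (List Char)) (h : r ≠ []) :
    pvJoin c (s :: r) = s ++ c :: pvJoin c r := by
  cases r with
  | nil => exact absurd rfl h
  | cons a t => rfl

lemma pvSplit_ne_nil (c : Char) (l : List Char) : pvSplit c l ≠ [] := by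
  induction l with
  | nil => simp [pvSplit]
  | cons d t ih =>
    simp only [pvSplit]
    split
    · simp
    · cases hs : pvSplit c t with
      | nil => exact absurd hs ih
      | cons a b => simp [List.modifyHead]

lemma pvSplit_join (c : Char) (l : List Char) : pvJoin c (pvSplit c l) = l := by
  induction l with
  | nil => rfl
  | cons d t ih =>
    simp only [pvSplit]
    split
    · rename_i h
      rw [pvJoin_cons c [] _ (pvSplit_ne_nil c t), ih, h]
      rfl
    · cases hs : pvSplit c t with
      | nil => exact absurd hs (pvSplit_ne_nil c t)
      | cons a b =>
        rw [hs] at ih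
        simp only [List.modifyHead]
        cases b with
        | nil =>
          show d :: a = d :: t
          exact congrArg _ ih
        | cons x y =>
          have hj : pvJoin c (a :: x :: y) = a ++ c :: pvJoin c (x :: y) := rfl
          rw [hj] at ih
          show d :: a ++ c :: pvJoin c (x :: y) = d :: t
          simp only [List.cons_append, ih]

lemma pvSplit_commafree (c : Char) (l : List Char) : ∀ s ∈ pvSplit c l, c ∉ s := by
  induction l with
  | nil => simp [pvSplit]
  | cons d t ih =>
    simp only [pvSplit]
    split
    · intro s hs
      rcases List.mem_cons.mp hs with rfl | hs
      · simp
      · exact ih s hs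
    · rename_i h
      cases hs : pvSplit c t with
      | nil => exact absurd hs (pvSplit_ne_nil c t)
      | cons a b =>
        have ha : a ∈ pvSplit c t := by rw [hs]; exact List.mem_cons_self
        intro s hsm
        simp only [List.modifyHead] at hsm
        rcases List.mem_cons.mp hsm with rfl | hsm
        · intro hc
          rcases List.mem_cons.mp hc with heq | hc
          · exact h heq.symm
          · exact ih a ha hc
        · exact ih s (by rw [hs]; exact List.mem_cons_of_mem _ hsm)

lemma pvSplitOn_go_char (c : Char) (l : List Char) :
    ∀ (fuel : Nat) (cur : List Char) (acc : List (List Char)), l.length < fuel →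
      PySem.Chars.splitOn.go [c] fuel l cur acc
        = acc.reverse ++ (pvSplit c l).modifyHead (cur.reverse ++ ·) := by
  induction l with
  | nil =>
    intro fuel cur acc _
    cases fuel with
    | zero => omega
    | succ f => simp [PySem.Chars.splitOn.go, pvSplit, List.modifyHead]
  | cons d t ih =>
    intro fuel cur acc hf
    cases fuel with
    | zero => omega
    | succ f =>
      rw [PySem.Chars.splitOn.go]
      by_cases hdc : d = c
      · subst hdc
        simp only [List.isPrefixOf, BEq.rfl, Bool.and_eq_true, and_true, if_pos]
        simp only [List.length_cons, List.length_nil, List.drop_succ_cons, List.drop_zero]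
        rw [ih f [] (cur.reverse :: acc) (by simpa using hf)]
        simp [pvSplit, List.modifyHead]
        cases pvSplit d t <;> rfl
      · have : ([c].isPrefixOf (d :: t)) = false := by
          simp [List.isPrefixOf]
          intro h; exact absurd h.symm hdc
        rw [this]
        simp only [Bool.false_eq_true, if_false]
        rw [ih f (d :: cur) acc (by simpa using hf)]
        simp only [pvSplit, if_neg hdc]
        cases hs : pvSplit c t with
        | nil => exact absurd hs (pvSplit_ne_nil c t)
        | cons a b => simp [List.modifyHead]

lemma pvSplitOn_char (l : List Char) :
    PySem.Chars.splitOn l [','] = pvSplit ',' l := by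
  rw [PySem.Chars.splitOn, pvSplitOn_go_char ',' l (l.length + 1) [] [] (by omega)]
  cases hs : pvSplit ',' l with
  | nil => exact absurd hs (pvSplit_ne_nil ',' l)
  | cons a b => simp [List.modifyHead]

lemma pvCount_go_char (l : List Char) :
    ∀ (fuel acc : Nat), l.length ≤ fuel →
      PySem.Chars.count.go ['"'] fuel l acc = acc + l.count '"' := by
  induction l with
  | nil =>
    intro fuel acc _
    cases fuel <;> simp [PySem.Chars.count.go]
  | cons d t ih =>
    intro fuel acc hf
    cases fuel with
    | zero => simp at hf
    | succ f =>
      rw [PySem.Chars.count.go]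
      by_cases hdc : d = '"'
      · subst hdc
        simp only [List.isPrefixOf, BEq.rfl, Bool.and_eq_true, and_true, if_pos]
        simp only [List.length_cons, List.length_nil, List.drop_succ_cons, List.drop_zero]
        rw [ih f (acc + 1) (by simpa using hf)]
        simp [List.count_cons]
        omega
      · have : (['"'].isPrefixOf (d :: t)) = false := by
          simp [List.isPrefixOf]
          intro h; exact absurd h.symm hdc
        rw [this]
        simp only [Bool.false_eq_true, if_false]
        rw [ih f acc (by simpa using hf)]
        simp [hdc]

lemma pvCount_char (m : List Char) : PySem.Chars.count m ['"'] = m.count '"' := by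
  rw [PySem.Chars.count]
  simp only [List.isEmpty_cons, Bool.false_eq_true, if_false]
  rw [pvCount_go_char m m.length 0 le_rfl]
  omega

def pvPar (m : List Char) : Bool := decide (m.count '"' % 2 = 1)

def pvCurOf : Option (List Char) → List Char
  | none => []
  | some b => b ++ [',']

def pvDict (pairs : List (List Char)) : PySem.Dict String String :=
  pairs.foldl pvPairStep PySem.Dict.empty

def pvFinA (st : List (List Char) × List Char × Bool) : List (List Char) :=
  if PySem.Chars.strip st.2.1 = [] then st.1 else st.1 ++ [PySem.Chars.strip st.2.1]

def pvFinB (st : List (List Char) × Option (List Char)) : List (List Char) :=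
  match st.2 with
  | none => st.1
  | some b => if PySem.Chars.strip b = [] then st.1 else st.1 ++ [PySem.Chars.strip b]

lemma pvPar_append_quote (m : List Char) : pvPar (m ++ ['"']) = !pvPar m := by
  rcases Nat.mod_two_eq_zero_or_one (m.count '"') with h | h <;>
    simp [pvPar, List.count_append, Nat.add_mod, h]

lemma pvPar_append_other (m : List Char) (c : Char) (hc : c ≠ '"') :
    pvPar (m ++ [c]) = pvPar m := by
  have h0 : List.count '"' [c] = 0 :=
    List.count_eq_zero.mpr (by simp [Ne.symm hc])
  simp [pvPar, List.count_append, h0]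

lemma pvPar_beq (m : List Char) : (m.count '"' % 2 == 0) = !pvPar m := by
  rcases Nat.mod_two_eq_zero_or_one (m.count '"') with h | h <;> simp [pvPar, h]

lemma pvPar_nil : pvPar [] = false := rfl

lemma pvFoldA_commafree (s : List Char) :
    ∀ (pairs : List (List Char)) (cur : List Char), ',' ∉ s →
      List.foldl pvStepA (pairs, cur, pvPar cur) s = (pairs, cur ++ s, pvPar (cur ++ s)) := by
  induction s with
  | nil => intro pairs cur _; simp
  | cons c t ih =>
    intro pairs cur hc
    have hct : ',' ∉ t := fun h => hc (List.mem_cons_of_mem _ h)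
    have hcc : c ≠ ',' := fun h => hc (h ▸ List.mem_cons_self)
    rw [List.foldl_cons]
    by_cases hq : c = '"'
    · subst hq
      have hst : pvStepA (pairs, cur, pvPar cur) '"' = (pairs, cur ++ ['"'], pvPar (cur ++ ['"'])) := by
        simp [pvStepA, pvPar_append_quote]
      rw [hst, ih pairs (cur ++ ['"']) hct]
      simp
    · have hb1 : (c == '"') = false := by simp [hq]
      have hb2 : (c == ',') = false := by simp [hcc]
      have hst : pvStepA (pairs, cur, pvPar cur) c = (pairs, cur ++ [c], pvPar (cur ++ [c])) := by
        simp [pvStepA, hb1, hb2, pvPar_append_other cur c hq]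
      rw [hst, ih pairs (cur ++ [c]) hct]
      simp

lemma pvDict_append_nil (P : List (List Char)) : pvDict (P ++ [[]]) = pvDict P := by
  have h : PySem.Chars.isIn ['='] [] = false := by decide
  simp [pvDict, List.foldl_append, pvPairStep, h]

lemma pvStrip_nil : PySem.Chars.strip ([] : List Char) = [] := rfl

def pvTail : List (List Char) → List Char
  | [] => []
  | r :: rs => ',' :: pvJoin ',' (r :: rs)

lemma pvJoin_eq_tail (seg : List Char) (rest : List (List Char)) :
    pvJoin ',' (seg :: rest) = seg ++ pvTail rest := by
  cases rest with
  | nil => simp [pvJoin, pvTail]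
  | cons r rs => rfl

lemma pvMain (segs : List (List Char)) :
    ∀ (pairs : List (List Char)) (buf : Option (List Char)),
      (∀ s ∈ segs, ',' ∉ s) → (segs = [] → buf = none) →
      pvDict (pvFinA (List.foldl pvStepA (pairs, pvCurOf buf, pvPar (pvCurOf buf)) (pvJoin ',' segs)))
      = pvDict (pvFinB (List.foldl pvStepB (pairs, buf) segs)) := by
  induction segs with
  | nil =>
    intro pairs buf _ hb
    rw [hb rfl]
    simp [pvJoin, pvCurOf, pvFinA, pvFinB, pvStrip_nil]
  | cons seg rest ih =>
    intro pairs buf hcf _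
    have hseg : ',' ∉ seg := hcf seg List.mem_cons_self
    have hrest : ∀ s ∈ rest, ',' ∉ s := fun s hs => hcf s (List.mem_cons_of_mem _ hs)
    -- the common continuation, for the merged buffer m
    have key : ∀ (pairs' : List (List Char)) (m : List Char),
        pvDict (pvFinA (List.foldl pvStepA (pairs', m, pvPar m) (pvTail rest)))
        = pvDict (pvFinB (List.foldl pvStepB
            (if pvPar m then (pairs', some m) else (pairs' ++ [PySem.Chars.strip m], none)) rest)) := by
      intro pairs' m
      cases rest with
      | nil =>
        by_cases hp : pvPar m
        · simp [hp, pvTail, pvFinA, pvFinB]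
        · have hpm : pvPar m = false := by simpa using hp
          by_cases hsm : PySem.Chars.strip m = []
          · simp [hpm, pvTail, pvFinA, pvFinB, hsm, pvDict_append_nil]
          · simp [hpm, pvTail, pvFinA, pvFinB, hsm]
      | cons r rs =>
        show pvDict (pvFinA (List.foldl pvStepA (List.foldl pvStepA (pairs', m, pvPar m) [','])
            (pvJoin ',' (r :: rs)))) = _
        by_cases hp : pvPar m
        · have hst : List.foldl pvStepA (pairs', m, pvPar m) [','] = (pairs', m ++ [','], pvPar m) := by
            simp [pvStepA, hp]
          rw [hst, if_pos hp]
          have h := ih pairs' (some m) hrest (by simp)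
          simp only [pvCurOf, pvPar_append_other m ',' (by decide)] at h
          exact h
        · have hpm : pvPar m = false := by simpa using hp
          have hst : List.foldl pvStepA (pairs', m, pvPar m) [',']
              = (pairs' ++ [PySem.Chars.strip m], [], pvPar m) := by
            simp [pvStepA, hpm]
          rw [hst, if_neg hp]
          have h := ih (pairs' ++ [PySem.Chars.strip m]) none hrest (by simp)
          simp only [pvCurOf, pvPar_nil] at h
          rw [hpm]
          exact h
    -- peel off the first segment on both sides
    cases buf with
    | none =>
      rw [pvJoin_eq_tail, List.foldl_append]
      simp only [pvCurOf]
      rw [pvFoldA_commafree seg pairs [] hseg]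
      have hB : pvStepB (pairs, none) seg
          = (if pvPar seg then (pairs, some seg) else (pairs ++ [PySem.Chars.strip seg], none)) := by
        simp only [pvStepB, pvCount_char, pvPar_beq]
        by_cases hp : pvPar seg <;> simp [hp]
      rw [List.foldl_cons, hB]
      simpa using key pairs seg
    | some b =>
      rw [pvJoin_eq_tail, List.foldl_append]
      simp only [pvCurOf]
      rw [pvFoldA_commafree seg pairs (b ++ [',']) hseg]
      have hB : pvStepB (pairs, some b) seg
          = (if pvPar (b ++ ',' :: seg) then (pairs, some (b ++ ',' :: seg))
             else (pairs ++ [PySem.Chars.strip (b ++ ',' :: seg)], none)) := by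
        simp only [pvStepB, pvCount_char, pvPar_beq, List.append_assoc, List.singleton_append]
        by_cases hp : pvPar (b ++ ',' :: seg) <;> simp [hp]
      rw [List.foldl_cons, hB]
      have h := key pairs (b ++ [','] ++ seg)
      simpa [List.append_assoc] using h

lemma pvTop (l : List Char) :
    pvDict (pvFinA (l.foldl pvStepA ([], [], false)))
    = pvDict (pvFinB ((PySem.Chars.splitOn l [',']).foldl pvStepB ([], none))) := by
  rw [pvSplitOn_char]
  have h := pvMain (pvSplit ',' l) [] none (pvSplit_commafree ',' l) (fun _ => rfl)
  rw [pvSplit_join] at h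
  simpa [pvCurOf, pvPar_nil] using h

-- ===== VERDICT (by name: the statement is the Claim_ definition above) =====
theorem parse_stream_info_spec : Claim_equal_parse_stream_info := by
  intro s _
  show parse_stream_info s = parse_stream_info_alt s
  unfold parse_stream_info parse_stream_info_alt
  exact congrArg PySem.Dict.items
    (pvTop (PySem.Str.replace s "#EXT-X-STREAM-INF:" "").toList)
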